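-- pv_equiv track=rewrite | github.com/JoSuhun/TIL | baekjoon/14696.py | findCard
-- ===== SOURCE A (Python) =====
-- def findCard(arr1, arr2):
--     for i in range(4, 0, -1):
--         if arr1.count(i) > arr2.count(i):
--             winner = 'A'
--             break
--         elif arr1.count(i) < arr2.count(i):
--             winner = 'B'
--             break
--     if arr1 == arr2:
--         winner = 'D'
--     return winner
-- ===== SOURCE B (Python) =====
-- def findCard(arr1, arr2):
--     # Encode each hand as one integer in a base exceeding any possible count:
--     # digit for value v (1..4) at position v-1.  Comparing the two encodings is
--     # exactly the highest-value-first count comparison.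
--     base = len(arr1) + len(arr2) + 1
--     s1 = sum(base ** (x - 1) for x in arr1 if 1 <= x <= 4)
--     s2 = sum(base ** (x - 1) for x in arr2 if 1 <= x <= 4)
--     if s1 > s2:
--         return 'A'
--     if s1 < s2:
--         return 'B'
--     return 'D'
-- ===== Notes on version B (the rewrite author's own statement) =====
-- stated objective: alternative
-- what changed: B replaces A's descending loop of repeated .count scans by a positional numeral encoding: each hand is folded in one pass into a single integer (digit for card value v at base-power v-1, base > any count), and the winner is decided by comparing the two integers.
-- outside the precondition, e.g. on findCard([1, 2], [2, 1]): A raises UnboundLocalError, B returns 'D'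
-- crash fix: When all counts of 4,3,2,1 are equal but the lists are not element-wise equal, A raises UnboundLocalError ('winner' never assigned) while B returns 'D' (equal encodings mean a draw). — e.g. on findCard([1, 2], [2, 1]): A raises UnboundLocalError, B returns "D"
import Mathlib
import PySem

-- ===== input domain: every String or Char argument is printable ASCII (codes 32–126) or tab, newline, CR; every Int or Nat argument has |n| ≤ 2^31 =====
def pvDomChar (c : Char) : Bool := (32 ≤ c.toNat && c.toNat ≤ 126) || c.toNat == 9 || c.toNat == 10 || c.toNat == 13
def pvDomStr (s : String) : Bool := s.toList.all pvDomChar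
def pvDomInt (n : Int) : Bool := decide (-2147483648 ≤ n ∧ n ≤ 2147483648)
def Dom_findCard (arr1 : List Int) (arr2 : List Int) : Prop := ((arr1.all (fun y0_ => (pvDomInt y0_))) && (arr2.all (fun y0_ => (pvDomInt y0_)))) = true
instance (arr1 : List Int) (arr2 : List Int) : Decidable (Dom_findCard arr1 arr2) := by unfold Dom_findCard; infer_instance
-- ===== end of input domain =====

-- B replaces A's descending loop of repeated .count scans by a positional numeral encoding:
-- one fold turns each hand into a single integer, and one integer comparison decides the winner
-- (objective: alternative, same asymptotic cost). Where A raises UnboundLocalError (all counts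
-- tie but the lists differ), B returns "D"; those inputs are outside Pre_ and documented in Raises_.

-- ===== PORT A =====
-- the for-loop with break: first i in range(4,0,-1) with differing counts decides 'A'/'B'; none = fell through
def findCardLoop (arr1 : List Int) (arr2 : List Int) : List Int → Option String
  | [] => none
  | i :: rest =>
    if PySem.List.count arr1 i > PySem.List.count arr2 i then some "A"
    else if PySem.List.count arr1 i < PySem.List.count arr2 i then some "B"
    else findCardLoop arr1 arr2 rest

def findCard (arr1 : List Int) (arr2 : List Int) : String :=
  let w := findCardLoop arr1 arr2 (PySem.List.pyRange 4 0 (-1))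
  -- the post-loop `if arr1 == arr2: winner = 'D'` reassignment
  let w' := if arr1 = arr2 then some "D" else w
  -- `none` here is Python's UnboundLocalError; such inputs are excluded by Pre_findCard
  w'.getD ""

-- ===== PORT B =====
-- sum(base**(x-1) for x in arr if 1<=x<=4); the guard guarantees x-1 ≥ 0, so '.toNat' on the
-- exponent is exact for Python's '**' here
def encodeCards (base : Int) (arr : List Int) : Int :=
  arr.foldl (fun acc x => if 1 ≤ x ∧ x ≤ 4 then acc + base ^ (x - 1).toNat else acc) 0

def findCard_alt (arr1 : List Int) (arr2 : List Int) : String :=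
  let base : Int := (arr1.length : Int) + (arr2.length : Int) + 1
  let s1 := encodeCards base arr1
  let s2 := encodeCards base arr2
  if s1 > s2 then "A"
  else if s1 < s2 then "B"
  else "D"

-- ===== PRECONDITION & SPEC =====
-- Pre_ excludes exactly the inputs on which A raises UnboundLocalError: every count of 4,3,2,1 ties yet the lists differ.
def Pre_findCard (arr1 : List Int) (arr2 : List Int) : Prop :=
  arr1 = arr2 ∨ arr1.count 4 ≠ arr2.count 4 ∨ arr1.count 3 ≠ arr2.count 3 ∨
    arr1.count 2 ≠ arr2.count 2 ∨ arr1.count 1 ≠ arr2.count 1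
instance (arr1 : List Int) (arr2 : List Int) : Decidable (Pre_findCard arr1 arr2) := by unfold Pre_findCard; infer_instance

def pvWitness_findCard : List Int × List Int := ([4, 1], [1, 1])

-- On inputs where every count of 4,3,2,1 ties but the lists are not equal, A raises UnboundLocalError; B returns "D".
def Raises_findCard (arr1 : List Int) (arr2 : List Int) : Prop :=
  arr1 ≠ arr2 ∧ arr1.count 4 = arr2.count 4 ∧ arr1.count 3 = arr2.count 3 ∧
    arr1.count 2 = arr2.count 2 ∧ arr1.count 1 = arr2.count 1
instance (arr1 : List Int) (arr2 : List Int) : Decidable (Raises_findCard arr1 arr2) := by unfold Raises_findCard; infer_instance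

def pvRaiseWitness_findCard : List Int × List Int := ([1, 2], [2, 1])
def pvRaiseWitnessOut_findCard : String := "D"

def Spec_findCard (arr1 : List Int) (arr2 : List Int) (out : String) : Prop := out = findCard_alt arr1 arr2
instance (arr1 : List Int) (arr2 : List Int) (out : String) : Decidable (Spec_findCard arr1 arr2 out) := by unfold Spec_findCard; infer_instance

-- ===== CLAIM (what is proved, stated in full; the proofs are below) =====
def Claim_equal_findCard : Prop := ∀ (arr1 : List Int) (arr2 : List Int), Dom_findCard arr1 arr2 → Pre_findCard arr1 arr2 → Spec_findCard arr1 arr2 (findCard arr1 arr2)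

def Claim_raises_findCard : Prop := (∀ (arr1 : List Int) (arr2 : List Int), Dom_findCard arr1 arr2 → Raises_findCard arr1 arr2 → ¬ Pre_findCard arr1 arr2) ∧ (Dom_findCard (pvRaiseWitness_findCard.1) (pvRaiseWitness_findCard.2) ∧ Raises_findCard (pvRaiseWitness_findCard.1) (pvRaiseWitness_findCard.2) ∧ findCard_alt (pvRaiseWitness_findCard.1) (pvRaiseWitness_findCard.2) = pvRaiseWitnessOut_findCard)

-- ===== LEMMAS AND PROOFS =====

-- A's loop over the concrete range, in terms of List.count
theorem a_eval (arr1 arr2 : List Int) :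
    findCard arr1 arr2 =
      (if arr1 = arr2 then some "D"
       else if arr2.count 4 < arr1.count 4 then some "A"
       else if arr1.count 4 < arr2.count 4 then some "B"
       else if arr2.count 3 < arr1.count 3 then some "A"
       else if arr1.count 3 < arr2.count 3 then some "B"
       else if arr2.count 2 < arr1.count 2 then some "A"
       else if arr1.count 2 < arr2.count 2 then some "B"
       else if arr2.count 1 < arr1.count 1 then some "A"
       else if arr1.count 1 < arr2.count 1 then some "B"
       else none).getD "" := by
  have hr : PySem.List.pyRange 4 0 (-1) = [4, 3, 2, 1] := by decide
  unfold findCard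
  rw [hr]
  simp only [findCardLoop, PySem.List.count_eq, gt_iff_lt]

-- the encoding equals the base-b numeral with the four counts as digits
theorem encode_go (b : Int) : ∀ (arr : List Int) (acc : Int),
    arr.foldl (fun acc x => if 1 ≤ x ∧ x ≤ 4 then acc + b ^ (x - 1).toNat else acc) acc =
      acc + (arr.count 1 : Int) + (arr.count 2 : Int) * b +
        (arr.count 3 : Int) * b ^ 2 + (arr.count 4 : Int) * b ^ 3
  | [], acc => by simp
  | x :: tl, acc => by
    simp only [List.foldl_cons, encode_go b tl, List.count_cons]
    by_cases h : 1 ≤ x ∧ x ≤ 4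
    · have hx : x = 1 ∨ x = 2 ∨ x = 3 ∨ x = 4 := by omega
      rcases hx with h1 | h1 | h1 | h1 <;> subst h1 <;>
        simp <;> ring
    · have h1 : x ≠ 1 := by omega
      have h2 : x ≠ 2 := by omega
      have h3 : x ≠ 3 := by omega
      have h4 : x ≠ 4 := by omega
      simp [h, h1, h2, h3, h4]

theorem encode_eq (b : Int) (arr : List Int) :
    encodeCards b arr = (arr.count 1 : Int) + (arr.count 2 : Int) * b +
      (arr.count 3 : Int) * b ^ 2 + (arr.count 4 : Int) * b ^ 3 := by
  unfold encodeCards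
  rw [encode_go]
  ring

-- a 3-digit base-b numeral with digits < b is below b^3
theorem small3 (b a1 a2 a3 : Int) (h1 : 0 ≤ a1) (h1' : a1 < b) (_h2 : 0 ≤ a2) (h2' : a2 < b)
    (_h3 : 0 ≤ a3) (h3' : a3 < b) : a1 + a2 * b + a3 * b ^ 2 < b ^ 3 := by
  nlinarith [mul_nonneg (show (0:Int) ≤ b - 1 - a2 by omega) (show (0:Int) ≤ b by omega),
    mul_nonneg (show (0:Int) ≤ b - 1 - a3 by omega) (mul_nonneg (show (0:Int) ≤ b by omega) (show (0:Int) ≤ b by omega))]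

-- lexicographically-smaller digit vectors encode to smaller numerals
theorem lexlt_enc (b a1 a2 a3 a4 b1 b2 b3 b4 : Int)
    (ha1 : 0 ≤ a1) (ha1' : a1 < b) (ha2 : 0 ≤ a2) (ha2' : a2 < b)
    (ha3 : 0 ≤ a3) (ha3' : a3 < b)
    (hb1 : 0 ≤ b1) (_hb1' : b1 < b) (hb2 : 0 ≤ b2) (hb2' : b2 < b)
    (hb3 : 0 ≤ b3) (hb3' : b3 < b)
    (hlex : a4 < b4 ∨ (a4 = b4 ∧ (a3 < b3 ∨ (a3 = b3 ∧ (a2 < b2 ∨ (a2 = b2 ∧ a1 < b1)))))) :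
    a1 + a2 * b + a3 * b ^ 2 + a4 * b ^ 3 < b1 + b2 * b + b3 * b ^ 2 + b4 * b ^ 3 := by
  have hb : 0 < b := by omega
  rcases hlex with h4 | ⟨h4, hrest⟩
  · have hs := small3 b a1 a2 a3 ha1 ha1' ha2 ha2' ha3 ha3'
    have hstep : (a4 + 1) * b ^ 3 ≤ b4 * b ^ 3 :=
      mul_le_mul_of_nonneg_right (by omega) (by positivity)
    nlinarith [mul_nonneg hb2 hb.le, mul_nonneg hb3 (sq_nonneg b)]
  · subst h4
    have : a1 + a2 * b + a3 * b ^ 2 < b1 + b2 * b + b3 * b ^ 2 := by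
      rcases hrest with h3 | ⟨h3, hrest⟩
      · have hs2 : a1 + a2 * b < b ^ 2 := by nlinarith [mul_nonneg (show (0:Int) ≤ b - 1 - a2 by omega) hb.le]
        have hstep : (a3 + 1) * b ^ 2 ≤ b3 * b ^ 2 :=
          mul_le_mul_of_nonneg_right (by omega) (by positivity)
        nlinarith [mul_nonneg hb2 hb.le]
      · subst h3
        rcases hrest with h2 | ⟨h2, h1⟩
        · have hstep : (a2 + 1) * b ≤ b2 * b := mul_le_mul_of_nonneg_right (by omega) hb.le
          nlinarith
        · subst h2; linarith
    linarith
  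

-- count-vector lex-order transfers to the encodings
theorem enc_lt (b : Int) (l1 l2 : List Int)
    (h1 : ∀ i : Int, (l1.count i : Int) < b) (h2 : ∀ i : Int, (l2.count i : Int) < b)
    (hlex : l1.count 4 < l2.count 4 ∨ (l1.count 4 = l2.count 4 ∧
      (l1.count 3 < l2.count 3 ∨ (l1.count 3 = l2.count 3 ∧
        (l1.count 2 < l2.count 2 ∨ (l1.count 2 = l2.count 2 ∧ l1.count 1 < l2.count 1)))))) :
    encodeCards b l1 < encodeCards b l2 := by
  rw [encode_eq, encode_eq]
  refine lexlt_enc b _ _ _ _ _ _ _ _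
    (Int.natCast_nonneg _) (h1 1) (Int.natCast_nonneg _) (h1 2) (Int.natCast_nonneg _) (h1 3)
    (Int.natCast_nonneg _) (h2 1) (Int.natCast_nonneg _) (h2 2) (Int.natCast_nonneg _) (h2 3) ?_
  rcases hlex with h | ⟨e4, h | ⟨e3, h | ⟨e2, h⟩⟩⟩
  · exact Or.inl (by exact_mod_cast h)
  · exact Or.inr ⟨by exact_mod_cast e4, Or.inl (by exact_mod_cast h)⟩
  · exact Or.inr ⟨by exact_mod_cast e4, Or.inr ⟨by exact_mod_cast e3, Or.inl (by exact_mod_cast h)⟩⟩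
  · exact Or.inr ⟨by exact_mod_cast e4, Or.inr ⟨by exact_mod_cast e3, Or.inr ⟨by exact_mod_cast e2, by exact_mod_cast h⟩⟩⟩

theorem findCard_spec' (arr1 arr2 : List Int) (h : Pre_findCard arr1 arr2) :
    findCard arr1 arr2 = findCard_alt arr1 arr2 := by
  set b : Int := (arr1.length : Int) + (arr2.length : Int) + 1 with hb
  have halt : findCard_alt arr1 arr2 =
      (if encodeCards b arr1 > encodeCards b arr2 then "A"
       else if encodeCards b arr1 < encodeCards b arr2 then "B" else "D") := rfl
  rw [a_eval, halt]
  have d1 : ∀ i : Int, (arr1.count i : Int) < b := by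
    intro i; have := List.count_le_length (l := arr1) (a := i); simp only [hb]; omega
  have d2 : ∀ i : Int, (arr2.count i : Int) < b := by
    intro i; have := List.count_le_length (l := arr2) (a := i); simp only [hb]; omega
  by_cases he : arr1 = arr2
  · subst he; simp
  · rw [if_neg he]
    rcases Nat.lt_trichotomy (arr2.count 4) (arr1.count 4) with h4 | h4 | h4
    · rw [if_pos h4, if_pos (enc_lt b arr2 arr1 d2 d1 (Or.inl h4))]
      rfl
    · rcases Nat.lt_trichotomy (arr2.count 3) (arr1.count 3) with h3 | h3 | h3
      · rw [if_neg (by omega), if_neg (by omega), if_pos h3,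
          if_pos (enc_lt b arr2 arr1 d2 d1 (Or.inr ⟨h4, Or.inl h3⟩))]
        rfl
      · rcases Nat.lt_trichotomy (arr2.count 2) (arr1.count 2) with h2 | h2 | h2
        · rw [if_neg (by omega), if_neg (by omega), if_neg (by omega), if_neg (by omega), if_pos h2,
            if_pos (enc_lt b arr2 arr1 d2 d1 (Or.inr ⟨h4, Or.inr ⟨h3, Or.inl h2⟩⟩))]
          rfl
        · rcases Nat.lt_trichotomy (arr2.count 1) (arr1.count 1) with h1 | h1 | h1
          · rw [if_neg (by omega), if_neg (by omega), if_neg (by omega), if_neg (by omega),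
              if_neg (by omega), if_neg (by omega), if_pos h1,
              if_pos (enc_lt b arr2 arr1 d2 d1 (Or.inr ⟨h4, Or.inr ⟨h3, Or.inr ⟨h2, h1⟩⟩⟩))]
            rfl
          · -- all counts equal yet lists differ: excluded by Pre_
            rcases h with h | h | h | h | h
            · exact absurd h he
            all_goals omega
          · have hlt := enc_lt b arr1 arr2 d1 d2
              (Or.inr ⟨h4.symm, Or.inr ⟨h3.symm, Or.inr ⟨h2.symm, h1⟩⟩⟩)
            rw [if_neg (by omega), if_neg (by omega), if_neg (by omega), if_neg (by omega),
              if_neg (by omega), if_neg (by omega), if_neg (by omega), if_pos h1,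
              if_neg (by omega), if_pos hlt]
            rfl
        · have hlt := enc_lt b arr1 arr2 d1 d2 (Or.inr ⟨h4.symm, Or.inr ⟨h3.symm, Or.inl h2⟩⟩)
          rw [if_neg (by omega), if_neg (by omega), if_neg (by omega), if_neg (by omega),
            if_neg (by omega), if_pos h2, if_neg (by omega), if_pos hlt]
          rfl
      · have hlt := enc_lt b arr1 arr2 d1 d2 (Or.inr ⟨h4.symm, Or.inl h3⟩)
        rw [if_neg (by omega), if_neg (by omega), if_neg (by omega), if_pos h3,
          if_neg (by omega), if_pos hlt]
        rfl
    · have hlt := enc_lt b arr1 arr2 d1 d2 (Or.inl h4)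
      rw [if_neg (by omega), if_pos h4, if_neg (by omega), if_pos hlt]
      rfl

-- ===== VERDICT (by name: the statement is the Claim_ definition above) =====
theorem findCard_spec : Claim_equal_findCard := by
  intro arr1 arr2 _ hpre
  exact findCard_spec' arr1 arr2 hpre

theorem findCard_raises : Claim_raises_findCard := by
  unfold Claim_raises_findCard
  constructor
  · intro arr1 arr2 _ hr hpre
    rcases hr with ⟨hne, h4, h3, h2, h1⟩
    rcases hpre with h | h | h | h | h <;> simp_all
  · exact ⟨by decide, by decide, by decide⟩

-- self-check: the recorded witness really lies in the raise region (a direct consequence of findCard_raises)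
theorem pvRaiseWitness_findCard_ok :
    Raises_findCard (pvRaiseWitness_findCard.1) (pvRaiseWitness_findCard.2) :=
  findCard_raises.2.2.1
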